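-- pv_equiv track=rewrite | github.com/glorialucheng/algorithm | chapter2.py | tsp_solution
-- ===== SOURCE A (Python) =====
-- from itertools import permutations
--
-- def generate_arr(n: int):
--     arr = [i for i in range(1, n + 1)]
--     res = []
--     for i in range(1, n + 1):
--         # 调用系统函数库，生成长度不同的排列对象
--         res.append(list(permutations(arr, i)))
--     # 返回所有排列，即长度为1、2、3...n的排列
--     return res
--
-- def hamilton_problem(g: list):
--     n = len(g)
--     index = generate_arr(n)[n - 1]  # index为路径的集合
--     res = []  # 所有符合条件的路径
--     for i in index:  # 第i条路径
--         for j in range(len(i) - 1):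
--             if g[i[j] - 1][i[j + 1] - 1] == 0:
--                 break
--             if j == len(i) - 2 and g[i[n - 1] - 1][i[0] - 1] != 0:
--                 res.append(i)
--     return res
--
-- def tsp_solution(g: list):
--     all_hamilton = hamilton_problem(g)  # 获取所有的哈密顿回路，再分别计算cost
--     cost = []
--     for i in all_hamilton:
--         temp = 0
--         for j in range(len(i) - 1):
--             temp += g[i[j] - 1][i[j + 1] - 1]
--         temp += g[i[len(i) - 1] - 1][i[0] - 1]
--         cost.append(temp)
--     min_cost = min(cost)
--     res = []  # 符合条件的最短路径
--     for i in range(len(cost)):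
--         if cost[i] == min_cost:
--             res.append(all_hamilton[i])
--     return res
-- ===== SOURCE B (Python) =====
-- from itertools import permutations
--
-- def tsp_solution(g: list):
--     # Single pass over the full-length permutations: validity check and cost are
--     # computed together, and a running minimum with its argmin list replaces the
--     # separate cost list / min() / filter passes of the original.
--     n = len(g)
--     best = None
--     res = []
--     for p in permutations(range(1, n + 1)):
--         cost = 0
--         ok = True
--         for a, b in zip(p, p[1:] + (p[0],)):
--             w = g[a - 1][b - 1]
--             if w == 0:
--                 ok = False
--                 break
--             cost += w
--         if not ok:
--             continue
--         if best is None or cost < best: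
--             best = cost
--             res = [p]
--         elif cost == best:
--             res.append(p)
--     if best is None:
--         raise ValueError("no hamiltonian cycle")
--     return res
-- ===== Notes on version B (the rewrite author's own statement) =====
-- stated objective: simpler
-- what changed: A enumerates permutations of every length 1..n (generate_arr), filters Hamiltonian tours in one pass, computes all costs in a second pass, takes min() and filters the minimum in a third; B makes a single pass over only the full-length permutations, fusing the zero-edge validity check with the cost accumulation and maintaining a running minimum with its argmin list, so generate_arr, the cost list, min() and the final filter pass disappear.
import Mathlib
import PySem

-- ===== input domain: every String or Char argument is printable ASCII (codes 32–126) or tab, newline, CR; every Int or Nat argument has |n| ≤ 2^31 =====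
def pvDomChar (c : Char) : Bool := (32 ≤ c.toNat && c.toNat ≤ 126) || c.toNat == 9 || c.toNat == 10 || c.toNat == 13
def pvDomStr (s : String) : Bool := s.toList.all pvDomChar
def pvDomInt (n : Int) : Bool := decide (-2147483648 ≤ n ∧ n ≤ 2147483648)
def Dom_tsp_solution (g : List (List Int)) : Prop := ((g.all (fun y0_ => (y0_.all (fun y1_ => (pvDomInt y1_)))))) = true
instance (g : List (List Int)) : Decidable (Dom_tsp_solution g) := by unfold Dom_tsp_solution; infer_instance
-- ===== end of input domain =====

-- B fuses A's three passes (filter Hamiltonian tours, compute all costs, select the min-cost ones)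
-- into one loop over the permutations that keeps a running minimum and its argmin list.
-- Equivalence is about the RETURN value; neither version mutates its argument.

-- ===== PORT A =====

-- g[a-1][b-1]; inside Pre_ the indices are always in range (a,b are 1-based vertices)
def gAt (g : List (List Int)) (a b : Int) : Int :=
  (g.getD (a - 1).toNat []).getD (b - 1).toNat 0

-- generate_arr: permutations of [1..n] of every length 1..n
def generate_arr (n : Nat) : List (List (List Int)) :=
  let arr := (List.range n).map (fun k => (k : Int) + 1)
  (List.range n).map (fun i => PySem.List.permutations arr (i + 1))

-- the inner 'for j in range(len(i)-1)' loop of hamilton_problem, with its break;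
-- returns whether path i gets appended
def hamLoop (g : List (List Int)) (i : List Int) (j : Nat) : Bool :=
  if h : j < i.length - 1 then
    if gAt g (i.getD j 0) (i.getD (j + 1) 0) == 0 then false
    else if j = i.length - 2 then
      decide (gAt g (i.getD (g.length - 1) 0) (i.getD 0 0) ≠ 0)
    else hamLoop g i (j + 1)
  else false
termination_by i.length - j
decreasing_by omega

def hamilton_problem (g : List (List Int)) : List (List Int) :=
  let n := g.length
  let index := (generate_arr n).getD (n - 1) []
  index.foldl (fun res i => if hamLoop g i 0 then res ++ [i] else res) []

def tourCost (g : List (List Int)) (i : List Int) : Int :=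
  (List.range (i.length - 1)).foldl
    (fun temp j => temp + gAt g (i.getD j 0) (i.getD (j + 1) 0)) 0
  + gAt g (i.getD (i.length - 1) 0) (i.getD 0 0)

def tsp_solution (g : List (List Int)) : List (List Int) :=
  let all_hamilton := hamilton_problem g
  let cost := all_hamilton.map (tourCost g)
  match PySem.List.min? cost (fun x => x) with
  | none => []  -- Python's min() raises ValueError here; outside Pre_
  | some min_cost =>
    (List.range cost.length).foldl
      (fun res i => if cost.getD i 0 == min_cost then res ++ [all_hamilton.getD i []] else res) []

-- ===== PORT B =====

-- the inner 'for a, b in zip(...)' loop of Source B: cost accumulation with break on a zero edge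
def edgeScan (g : List (List Int)) : List (Int × Int) → Int → Option Int
  | [], cost => some cost
  | ab :: rest, cost =>
    let w := gAt g ab.1 ab.2
    if w == 0 then none else edgeScan g rest (cost + w)

-- the body of Source B's main loop: update (best, res) from permutation p
def bStep (g : List (List Int)) (st : Option Int × List (List Int)) (p : List Int) :
    Option Int × List (List Int) :=
  match edgeScan g (p.zip (p.drop 1 ++ p.take 1)) 0 with
  | none => st
  | some c =>
    match st.1 with
    | none => (some c, [p])
    | some b => if c < b then (some c, [p]) else if c == b then (st.1, st.2 ++ [p]) else st

def tsp_solution_alt (g : List (List Int)) : List (List Int) :=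
  let n := g.length
  let r := (PySem.List.permutations ((List.range n).map (fun k => (k : Int) + 1)) n).foldl
      (bStep g) (none, [])
  match r.1 with
  | none => []  -- Source B raises ValueError here; outside Pre_
  | some _ => r.2

-- ===== PRECONDITION & SPEC =====

-- a cyclically closed tour all of whose edges are nonzero (used only to state Pre_)
def validTour (g : List (List Int)) (p : List Int) : Bool :=
  (p.zip (p.drop 1 ++ p.take 1)).all (fun ab => gAt g ab.1 ab.2 != 0)

-- Exactly the inputs on which the Python A returns: n ≥ 2 (for n ≤ 1 A raises: no tour is
-- ever collected, so min() gets no values, and for n = 0 the permutation-table lookup already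
-- fails), every off-diagonal entry g[i][j] exists (A reads all of them; a missing one is an
-- IndexError), and some Hamiltonian tour has all edges nonzero (otherwise min() raises
-- ValueError).
def Pre_tsp_solution (g : List (List Int)) : Prop :=
  2 ≤ g.length ∧
  (∀ i < g.length, ∀ j < g.length, j ≠ i → j < (g.getD i []).length) ∧
  ∃ p ∈ PySem.List.permutations ((List.range g.length).map (fun k => (k : Int) + 1)) g.length,
    validTour g p = true

instance (g : List (List Int)) : Decidable (Pre_tsp_solution g) := by
  unfold Pre_tsp_solution; infer_instance

def pvWitness_tsp_solution : List (List Int) := [[0, 1, 2], [1, 0, 3], [2, 3, 0]]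

def Spec_tsp_solution (g : List (List Int)) (out : List (List Int)) : Prop := out = tsp_solution_alt g
instance (g : List (List Int)) (out : List (List Int)) : Decidable (Spec_tsp_solution g out) := by unfold Spec_tsp_solution; infer_instance

-- ===== CLAIM (what is proved, stated in full; the proofs are below) =====
def Claim_equal_tsp_solution : Prop := ∀ (g : List (List Int)), Dom_tsp_solution g → Pre_tsp_solution g → Spec_tsp_solution g (tsp_solution g)

-- ===== LEMMAS AND PROOFS =====

theorem edgeScan_char (g : List (List Int)) : ∀ (l : List (Int × Int)) (c : Int),
    edgeScan g l c =
      if l.all (fun ab => !(gAt g ab.1 ab.2 == 0)) then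
        some (c + (l.map (fun ab => gAt g ab.1 ab.2)).sum) else none
  | [], c => by simp [edgeScan]
  | ab :: rest, c => by
    simp only [edgeScan, List.all_cons, List.map_cons, List.sum_cons]
    by_cases h : gAt g ab.1 ab.2 == 0
    · simp [h]
    · rw [edgeScan_char g rest (c + gAt g ab.1 ab.2)]
      by_cases h2 : rest.all (fun ab => !(gAt g ab.1 ab.2 == 0))
      · simp [h, h2]; ring
      · simp [h, h2]

theorem E_eq (p : List Int) (n : Nat) (hp : p.length = n) (hn : 2 ≤ n) :
    p.zip (p.drop 1 ++ p.take 1)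
      = (List.range (n - 1)).map (fun j => (p.getD j 0, p.getD (j + 1) 0))
        ++ [(p.getD (n - 1) 0, p.getD 0 0)] := by
  apply List.ext_getElem
  · simp [hp]; omega
  · intro k h1 h2
    have hk : k < n := by simp [hp] at h1; omega
    rw [List.getElem_zip]
    by_cases hlt : k < n - 1
    · rw [List.getElem_append_left (by simp; omega), List.getElem_append_left (by simp; omega)]
      simp only [List.getElem_map, List.getElem_range, List.getElem_drop]
      rw [List.getD_eq_getElem p 0 (by omega), List.getD_eq_getElem p 0 (by omega)]
      simp only [Prod.mk.injEq, true_and]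
      congr 1
      omega
    · have hk1 : k = n - 1 := by omega
      rw [List.getElem_append_right (by simp [hp]; omega), List.getElem_append_right (by simp; omega)]
      simp only [List.length_map, List.length_range, List.getElem_singleton, List.length_drop]
      rw [List.getElem_take]
      rw [List.getD_eq_getElem p 0 (by omega), List.getD_eq_getElem p 0 (by omega)]
      simp only [Prod.mk.injEq]
      constructor <;> (congr 1 <;> omega)

theorem hamLoop_char (g : List (List Int)) (p : List Int)
    (hp : p.length = g.length) (hn : 2 ≤ g.length) :
    ∀ (m j : Nat), j + m = g.length - 2 →
    hamLoop g p j =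
      (((List.range (g.length - 1)).drop j).all
          (fun k => !(gAt g (p.getD k 0) (p.getD (k + 1) 0) == 0))
        && !(gAt g (p.getD (g.length - 1) 0) (p.getD 0 0) == 0)) := by
  intro m
  induction m with
  | zero =>
    intro j hj
    have hj' : j = g.length - 2 := by omega
    rw [hamLoop]
    rw [dif_pos (by omega)]
    have hdrop : (List.range (g.length - 1)).drop j = [j] := by
      rw [List.drop_eq_getElem_cons (by simp; omega)]
      simp only [List.getElem_range]
      have : (List.range (g.length - 1)).drop (j + 1) = [] := by
        apply List.drop_eq_nil_of_le; simp; omega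
      rw [this]
    rw [hdrop]
    by_cases h : gAt g (p.getD j 0) (p.getD (j + 1) 0) == 0
    · rw [if_pos h]
      have h' : (gAt g (p[j]?.getD 0) (p[j + 1]?.getD 0) == 0) = true := by simpa using h
      simp [h']
    · rw [if_neg h, if_pos (show j = p.length - 2 by omega)]
      have h' : (gAt g (p[j]?.getD 0) (p[j + 1]?.getD 0) == 0) = false := by simpa using h
      simp [h', ← Bool.beq_eq_decide_eq]
  | succ m ih =>
    intro j hj
    rw [hamLoop]
    rw [dif_pos (by omega)]
    rw [List.drop_eq_getElem_cons (by simp; omega)]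
    simp only [List.getElem_range, List.all_cons]
    by_cases h : gAt g (p.getD j 0) (p.getD (j + 1) 0) == 0
    · rw [if_pos h]
      have h' : (gAt g (p[j]?.getD 0) (p[j + 1]?.getD 0) == 0) = true := by simpa using h
      simp [h']
    · rw [if_neg h, if_neg (show ¬ j = p.length - 2 by omega), ih (j + 1) (by omega)]
      have h' : (gAt g (p[j]?.getD 0) (p[j + 1]?.getD 0) == 0) = false := by simpa using h
      simp [h']

theorem bridge (g : List (List Int)) (p : List Int)
    (hp : p.length = g.length) (hn : 2 ≤ g.length) :
    edgeScan g (p.zip (p.drop 1 ++ p.take 1)) 0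
      = if hamLoop g p 0 then some (tourCost g p) else none := by
  rw [edgeScan_char, E_eq p g.length hp hn]
  rw [hamLoop_char g p hp hn (g.length - 2) 0 (by omega)]
  simp only [List.drop_zero, List.all_append, List.all_cons, List.all_nil, Bool.and_true,
    List.all_map, List.map_append, List.map_map, List.map_cons, List.map_nil,
    List.sum_append, List.sum_cons, List.sum_nil]
  have hc : tourCost g p =
      ((List.range (g.length - 1)).map
        (fun j => gAt g (p.getD j 0) (p.getD (j + 1) 0))).sum
      + gAt g (p.getD (g.length - 1) 0) (p.getD 0 0) := by
    unfold tourCost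
    rw [PySem.List.foldl_add]
    rw [hp]; ring
  rw [hc]
  congr 1
  simp only [Function.comp_def]
  ring_nf

theorem filterMap_if_fst {α β : Type} (q : α → Bool) (f : α → β) : ∀ (l : List α),
    (l.filterMap (fun x => if q x then some (x, f x) else none)).map Prod.fst = l.filter q
  | [] => by simp
  | x :: l => by
    by_cases h : q x <;>
      simp [h, filterMap_if_fst q f l]

theorem filterMap_if_snd {α β : Type} (q : α → Bool) (f : α → β) : ∀ (l : List α),
    (l.filterMap (fun x => if q x then some (x, f x) else none)).map Prod.snd = (l.filter q).map f
  | [] => by simp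
  | x :: l => by
    by_cases h : q x <;>
      simp [h, filterMap_if_snd q f l]

theorem foldl_range_getD {α β : Type} (f : β → α → β) (d : α) (init : β) : ∀ (l : List α),
    (List.range l.length).foldl (fun acc k => f acc (l.getD k d)) init = l.foldl f init := by
  intro l
  induction l using List.reverseRecOn generalizing init with
  | nil => simp
  | append_singleton l x ih =>
    rw [List.length_append, List.length_singleton, List.range_succ, List.foldl_append,
      List.foldl_append]
    have h1 : (List.range l.length).foldl (fun acc k => f acc ((l ++ [x]).getD k d)) init
        = (List.range l.length).foldl (fun acc k => f acc (l.getD k d)) init := by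
      apply PySem.List.foldl_congr_mem
      intro acc k hk
      rw [List.getD_append _ _ _ _ (List.mem_range.mp hk)]
    rw [h1, ih]
    simp only [List.foldl_cons, List.foldl_nil]
    rw [List.getD_eq_getElem _ _ (by simp), List.getElem_concat_length rfl]

theorem min?_append_singleton (s : List Int) (m c : Int)
    (h : PySem.List.min? s (fun x => x) = some m) :
    PySem.List.min? (s ++ [c]) (fun x => x) = some (min m c) := by
  match s with
  | [] => rw [PySem.List.min?] at h; simp at h
  | x :: t =>
    rw [PySem.List.min?_id_cons] at h
    rw [List.cons_append, PySem.List.min?_id_cons, List.foldl_append]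
    simp only [List.foldl_cons, List.foldl_nil]
    rw [Option.some_inj.mp h]

-- the state update of Source B's loop on an already-validated (tour, cost) pair
def step2 (st : Option Int × List (List Int)) (q : List Int × Int) :
    Option Int × List (List Int) :=
  match st.1 with
  | none => (some q.2, [q.1])
  | some b => if q.2 < b then (some q.2, [q.1]) else if q.2 == b then (st.1, st.2 ++ [q.1]) else st

theorem argmin_fold : ∀ (ps : List (List Int × Int)),
    ps.foldl step2 (none, []) =
      match PySem.List.min? (ps.map Prod.snd) (fun x => x) with
      | none => (none, [])
      | some m => (some m, (ps.filter (fun q => q.2 == m)).map Prod.fst) := by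
  intro ps
  induction ps using List.reverseRecOn with
  | nil => simp [PySem.List.min?]
  | append_singleton l q ih =>
    rw [List.foldl_append, ih, List.map_append]
    simp only [List.map_cons, List.map_nil]
    cases hmin : PySem.List.min? (l.map Prod.snd) (fun x => x) with
    | none =>
      have hl : l = [] := by
        have := (PySem.List.min?_eq_none_iff (l.map Prod.snd) (fun x => x)).mp hmin
        simpa using this
      subst hl
      simp [step2, PySem.List.min?_id_cons]
    | some m =>
      have hmle : ∀ x ∈ l, m ≤ x.2 := by
        intro x hx
        exact PySem.List.min?_isMin hmin x.2 (List.mem_map.mpr ⟨x, hx, rfl⟩)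
      rw [min?_append_singleton _ _ _ hmin]
      simp only [List.foldl_cons, List.foldl_nil]
      rcases lt_trichotomy q.2 m with hlt | heq | hgt
      · rw [min_eq_right (le_of_lt hlt)]
        have hfil : l.filter (fun x => x.2 == q.2) = [] := by
          rw [List.filter_eq_nil_iff]
          intro x hx
          simp only [beq_iff_eq]
          have := hmle x hx; omega
        simp [step2, hlt, List.filter_append, hfil]
      · rw [heq, min_self]
        simp [step2, heq, List.filter_append]
      · rw [min_eq_left (le_of_lt hgt)]
        have : ¬ (q.2 == m) = true := by simp; omega
        simp [step2, not_lt.mpr (le_of_lt hgt), this, List.filter_append]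

theorem main_eq (g : List (List Int)) (hn : 2 ≤ g.length) :
    tsp_solution g = tsp_solution_alt g := by
  set L := PySem.List.permutations ((List.range g.length).map fun k => (k : Int) + 1) g.length
    with hL
  set L' := L.filterMap (fun p => if hamLoop g p 0 then some (p, tourCost g p) else none)
    with hL'
  have hLlen : ∀ p ∈ L, p.length = g.length := fun p hp =>
    PySem.List.length_of_mem_permutations hp
  have hindex : (generate_arr g.length).getD (g.length - 1) [] = L := by
    unfold generate_arr
    rw [List.getD_eq_getElem _ _ (by simp; omega)]
    simp only [List.getElem_map, List.getElem_range]
    rw [hL]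
    congr 1
    omega
  have hham : hamilton_problem g = L.filter (fun p => hamLoop g p 0) := by
    unfold hamilton_problem
    simp only []
    rw [hindex, PySem.List.foldl_append_if_eq_filter]
    simp
  have hall : hamilton_problem g = L'.map Prod.fst := by
    rw [hham, hL', filterMap_if_fst]
  have hcost : (hamilton_problem g).map (tourCost g) = L'.map Prod.snd := by
    rw [hham, hL', filterMap_if_snd]
  have hB : L.foldl (bStep g) (none, []) = L'.foldl step2 (none, []) := by
    rw [hL', List.foldl_filterMap]
    apply PySem.List.foldl_congr_mem
    intro st p hp
    unfold bStep
    rw [bridge g p (hLlen p hp) hn]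
    by_cases hh : hamLoop g p 0
    · simp only [if_pos hh]
      rfl
    · simp only [if_neg hh]
  simp only [tsp_solution, tsp_solution_alt]
  rw [hcost, hall, hB, argmin_fold]
  cases hm : PySem.List.min? (L'.map Prod.snd) (fun x => x) with
  | none => simp
  | some m =>
    simp only []
    have hlen : (L'.map Prod.snd).length = L'.length := by simp
    rw [hlen]
    have hcong : (List.range L'.length).foldl
        (fun res i => if (L'.map Prod.snd).getD i 0 == m then res ++ [(L'.map Prod.fst).getD i []] else res) []
        = (List.range L'.length).foldl
        (fun res i => (fun res q => if q.2 == m then res ++ [q.1] else res) res (L'.getD i ([], 0))) [] := by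
      apply PySem.List.foldl_congr_mem
      intro acc i hi
      have hi' : i < L'.length := List.mem_range.mp hi
      rw [List.getD_eq_getElem _ _ (by simpa using hi'), List.getD_eq_getElem _ _ (by simpa using hi'),
        List.getD_eq_getElem _ _ hi', List.getElem_map, List.getElem_map]
    rw [hcong, foldl_range_getD (fun res q => if q.2 == m then res ++ [q.1] else res) ([], 0) [] L',
      PySem.List.foldl_append_if (fun q => q.2 == m) Prod.fst]
    simp

-- ===== VERDICT =====
theorem tsp_solution_spec : Claim_equal_tsp_solution := by
  intro g _ hpre
  unfold Spec_tsp_solution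
  exact main_eq g hpre.1
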